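-- pv_equiv track=rewrite | github.com/Mjvolk3/torchcell | experiments/006-kuzmin-tmi/scripts/analyze_filtering_tradeoffs.py | categorize_experiments
-- ===== SOURCE A (Python) =====
-- def categorize_experiments(experiment_has_pert_type, dataset_name):
--     """Categorize experiments based on what perturbation types they contain."""
--     categories = {
--         "deletion_only": 0,
--         "ts_allele_only": 0,
--         "allele_only": 0,
--         "deletion_and_ts_allele": 0,
--         "deletion_and_allele": 0,
--         "ts_allele_and_allele": 0,
--         "all_three": 0,
--     }
--
--     for exp_id, pert_types in experiment_has_pert_type.items():
--         has_deletion = pert_types.get("deletion", False)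
--         has_ts = pert_types.get("temperature_sensitive_allele", False)
--         has_allele = pert_types.get("allele", False)
--
--         if has_deletion and not has_ts and not has_allele:
--             categories["deletion_only"] += 1
--         elif has_ts and not has_deletion and not has_allele:
--             categories["ts_allele_only"] += 1
--         elif has_allele and not has_deletion and not has_ts:
--             categories["allele_only"] += 1
--         elif has_deletion and has_ts and not has_allele:
--             categories["deletion_and_ts_allele"] += 1
--         elif has_deletion and has_allele and not has_ts:
--             categories["deletion_and_allele"] += 1
--         elif has_ts and has_allele and not has_deletion:
--             categories["ts_allele_and_allele"] += 1
--         elif has_deletion and has_ts and has_allele: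
--             categories["all_three"] += 1
--
--     return categories
-- ===== SOURCE B (Python) =====
-- def categorize_experiments(experiment_has_pert_type, dataset_name):
--     """Categorize experiments based on what perturbation types they contain."""
--     masks = []
--     for pert_types in experiment_has_pert_type.values():
--         m = 0
--         if pert_types.get("deletion", False):
--             m += 1
--         if pert_types.get("temperature_sensitive_allele", False):
--             m += 2
--         if pert_types.get("allele", False):
--             m += 4
--         masks.append(m)
--     return {
--         name: masks.count(mask)
--         for name, mask in [
--             ("deletion_only", 1),
--             ("ts_allele_only", 2),
--             ("allele_only", 4),
--             ("deletion_and_ts_allele", 3),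
--             ("deletion_and_allele", 5),
--             ("ts_allele_and_allele", 6),
--             ("all_three", 7),
--         ]
--     }
-- ===== Notes on version B (the rewrite author's own statement) =====
-- stated objective: alternative
-- what changed: Instead of one pass that classifies each experiment with a seven-way if/elif chain and increments a counter dict, B first reduces each experiment to a 3-bit perturbation mask and then builds the result in a second stage by counting each of the seven nonzero masks in the mask list (mask 0 is simply never asked for).
import Mathlib
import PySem

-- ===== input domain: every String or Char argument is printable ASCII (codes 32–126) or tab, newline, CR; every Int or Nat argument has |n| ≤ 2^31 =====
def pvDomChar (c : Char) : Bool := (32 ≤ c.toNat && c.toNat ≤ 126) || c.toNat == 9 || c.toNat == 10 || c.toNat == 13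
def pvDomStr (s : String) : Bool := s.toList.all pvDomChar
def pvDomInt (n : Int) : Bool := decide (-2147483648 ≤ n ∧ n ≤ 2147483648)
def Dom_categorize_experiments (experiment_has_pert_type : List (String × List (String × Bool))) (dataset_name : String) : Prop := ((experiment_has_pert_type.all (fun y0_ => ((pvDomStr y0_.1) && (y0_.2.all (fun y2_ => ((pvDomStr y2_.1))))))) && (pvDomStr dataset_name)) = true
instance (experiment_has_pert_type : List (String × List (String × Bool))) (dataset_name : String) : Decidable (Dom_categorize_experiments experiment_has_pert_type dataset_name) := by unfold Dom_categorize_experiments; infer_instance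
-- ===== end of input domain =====

-- B replaces A's single classify-and-increment pass by two stages: reduce each experiment
-- to a 3-bit mask, then count each of the seven nonzero masks (alternative; same cost).
-- ===== PORT A =====
def pvInitCats : PySem.Dict String Int :=
  PySem.Dict.mk [("deletion_only", 0), ("ts_allele_only", 0), ("allele_only", 0),
    ("deletion_and_ts_allele", 0), ("deletion_and_allele", 0), ("ts_allele_and_allele", 0),
    ("all_three", 0)]

def pvStepA (categories : PySem.Dict String Int)
    (entry : String × List (String × Bool)) : PySem.Dict String Int :=
  let pert_types := PySem.Dict.mk entry.2
  let has_deletion := pert_types.getD "deletion" false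
  let has_ts := pert_types.getD "temperature_sensitive_allele" false
  let has_allele := pert_types.getD "allele" false
  if has_deletion && !has_ts && !has_allele then categories.modify "deletion_only" 0 (· + 1)
  else if has_ts && !has_deletion && !has_allele then categories.modify "ts_allele_only" 0 (· + 1)
  else if has_allele && !has_deletion && !has_ts then categories.modify "allele_only" 0 (· + 1)
  else if has_deletion && has_ts && !has_allele then categories.modify "deletion_and_ts_allele" 0 (· + 1)
  else if has_deletion && has_allele && !has_ts then categories.modify "deletion_and_allele" 0 (· + 1)
  else if has_ts && has_allele && !has_deletion then categories.modify "ts_allele_and_allele" 0 (· + 1)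
  else if has_deletion && has_ts && has_allele then categories.modify "all_three" 0 (· + 1)
  else categories

def categorize_experiments (experiment_has_pert_type : List (String × List (String × Bool))) (dataset_name : String) : List (String × Int) :=
  (experiment_has_pert_type.foldl pvStepA pvInitCats).items

-- ===== PORT B =====
def pvMaskB (pert_list : List (String × Bool)) : Int :=
  let pert_types := PySem.Dict.mk pert_list
  let m : Int := 0
  let m := if pert_types.getD "deletion" false then m + 1 else m
  let m := if pert_types.getD "temperature_sensitive_allele" false then m + 2 else m
  let m := if pert_types.getD "allele" false then m + 4 else m
  m

def categorize_experiments_alt (experiment_has_pert_type : List (String × List (String × Bool))) (dataset_name : String) : List (String × Int) :=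
  let masks := experiment_has_pert_type.foldl (fun acc e => acc ++ [pvMaskB e.2]) []
  [("deletion_only", (masks.count 1 : Int)), ("ts_allele_only", (masks.count 2 : Int)),
   ("allele_only", (masks.count 4 : Int)), ("deletion_and_ts_allele", (masks.count 3 : Int)),
   ("deletion_and_allele", (masks.count 5 : Int)), ("ts_allele_and_allele", (masks.count 6 : Int)),
   ("all_three", (masks.count 7 : Int))]

-- ===== PRECONDITION & SPEC =====
def Spec_categorize_experiments (experiment_has_pert_type : List (String × List (String × Bool))) (dataset_name : String) (out : List (String × Int)) : Prop := out = categorize_experiments_alt experiment_has_pert_type dataset_name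
instance (experiment_has_pert_type : List (String × List (String × Bool))) (dataset_name : String) (out : List (String × Int)) : Decidable (Spec_categorize_experiments experiment_has_pert_type dataset_name out) := by unfold Spec_categorize_experiments; infer_instance

-- ===== CLAIM (what is proved, stated in full; the proofs are below) =====
def Claim_equal_categorize_experiments : Prop := ∀ (experiment_has_pert_type : List (String × List (String × Bool))) (dataset_name : String), Dom_categorize_experiments experiment_has_pert_type dataset_name → Spec_categorize_experiments experiment_has_pert_type dataset_name (categorize_experiments experiment_has_pert_type dataset_name)

-- ===== LEMMAS AND PROOFS =====

-- B's mask-accumulating foldl is just a map.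
theorem pvMasks_eq_map (l : List (String × List (String × Bool))) (acc : List Int) :
    l.foldl (fun acc e => acc ++ [pvMaskB e.2]) acc = acc ++ l.map (fun e => pvMaskB e.2) := by
  induction l generalizing acc with
  | nil => simp
  | cons x xs ih => simp [List.foldl, ih]

-- Main invariant: A's fold over any starting counts yields those counts plus the mask counts.
theorem pvFoldA_items (l : List (String × List (String × Bool))) :
    ∀ (c1 c2 c3 c4 c5 c6 c7 : Int),
    (l.foldl pvStepA (PySem.Dict.mk [("deletion_only", c1), ("ts_allele_only", c2), ("allele_only", c3), ("deletion_and_ts_allele", c4), ("deletion_and_allele", c5), ("ts_allele_and_allele", c6), ("all_three", c7)])).items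
    = [("deletion_only", c1 + ((l.map (fun e => pvMaskB e.2)).count 1 : Int)),
       ("ts_allele_only", c2 + ((l.map (fun e => pvMaskB e.2)).count 2 : Int)),
       ("allele_only", c3 + ((l.map (fun e => pvMaskB e.2)).count 4 : Int)),
       ("deletion_and_ts_allele", c4 + ((l.map (fun e => pvMaskB e.2)).count 3 : Int)),
       ("deletion_and_allele", c5 + ((l.map (fun e => pvMaskB e.2)).count 5 : Int)),
       ("ts_allele_and_allele", c6 + ((l.map (fun e => pvMaskB e.2)).count 6 : Int)),
       ("all_three", c7 + ((l.map (fun e => pvMaskB e.2)).count 7 : Int))] := by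
  induction l with
  | nil => intro c1 c2 c3 c4 c5 c6 c7; simp
  | cons x xs ih =>
    intro c1 c2 c3 c4 c5 c6 c7
    rw [List.foldl_cons]
    cases h1 : (PySem.Dict.mk x.2).getD "deletion" false <;>
      cases h2 : (PySem.Dict.mk x.2).getD "temperature_sensitive_allele" false <;>
        cases h3 : (PySem.Dict.mk x.2).getD "allele" false
    · have hm : pvMaskB x.2 = 0 := by simp [pvMaskB, h1, h2, h3]
      have hs : pvStepA (PySem.Dict.mk [("deletion_only", c1), ("ts_allele_only", c2), ("allele_only", c3), ("deletion_and_ts_allele", c4), ("deletion_and_allele", c5), ("ts_allele_and_allele", c6), ("all_three", c7)]) x = PySem.Dict.mk [("deletion_only", c1), ("ts_allele_only", c2), ("allele_only", c3), ("deletion_and_ts_allele", c4), ("deletion_and_allele", c5), ("ts_allele_and_allele", c6), ("all_three", c7)] := by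
        simp [pvStepA, h1, h2, h3]
      rw [hs, ih _ _ _ _ _ _ _]
      simp [List.count_cons, hm, List.cons.injEq, Prod.mk.injEq]
    · have hm : pvMaskB x.2 = 4 := by simp [pvMaskB, h1, h2, h3]
      have hs : pvStepA (PySem.Dict.mk [("deletion_only", c1), ("ts_allele_only", c2), ("allele_only", c3), ("deletion_and_ts_allele", c4), ("deletion_and_allele", c5), ("ts_allele_and_allele", c6), ("all_three", c7)]) x = PySem.Dict.mk [("deletion_only", c1), ("ts_allele_only", c2), ("allele_only", c3 + 1), ("deletion_and_ts_allele", c4), ("deletion_and_allele", c5), ("ts_allele_and_allele", c6), ("all_three", c7)] := by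
        simp [pvStepA, h1, h2, h3]
        simp [PySem.Dict.modify, PySem.Dict.getD, PySem.Dict.get?, PySem.Dict.insert]
      rw [hs, ih _ _ _ _ _ _ _]
      simp [List.count_cons, hm, List.cons.injEq, Prod.mk.injEq]
      omega
    · have hm : pvMaskB x.2 = 2 := by simp [pvMaskB, h1, h2, h3]
      have hs : pvStepA (PySem.Dict.mk [("deletion_only", c1), ("ts_allele_only", c2), ("allele_only", c3), ("deletion_and_ts_allele", c4), ("deletion_and_allele", c5), ("ts_allele_and_allele", c6), ("all_three", c7)]) x = PySem.Dict.mk [("deletion_only", c1), ("ts_allele_only", c2 + 1), ("allele_only", c3), ("deletion_and_ts_allele", c4), ("deletion_and_allele", c5), ("ts_allele_and_allele", c6), ("all_three", c7)] := by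
        simp [pvStepA, h1, h2, h3]
        simp [PySem.Dict.modify, PySem.Dict.getD, PySem.Dict.get?, PySem.Dict.insert]
      rw [hs, ih _ _ _ _ _ _ _]
      simp [List.count_cons, hm, List.cons.injEq, Prod.mk.injEq]
      omega
    · have hm : pvMaskB x.2 = 6 := by simp [pvMaskB, h1, h2, h3]
      have hs : pvStepA (PySem.Dict.mk [("deletion_only", c1), ("ts_allele_only", c2), ("allele_only", c3), ("deletion_and_ts_allele", c4), ("deletion_and_allele", c5), ("ts_allele_and_allele", c6), ("all_three", c7)]) x = PySem.Dict.mk [("deletion_only", c1), ("ts_allele_only", c2), ("allele_only", c3), ("deletion_and_ts_allele", c4), ("deletion_and_allele", c5), ("ts_allele_and_allele", c6 + 1), ("all_three", c7)] := by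
        simp [pvStepA, h1, h2, h3]
        simp [PySem.Dict.modify, PySem.Dict.getD, PySem.Dict.get?, PySem.Dict.insert]
      rw [hs, ih _ _ _ _ _ _ _]
      simp [List.count_cons, hm, List.cons.injEq, Prod.mk.injEq]
      omega
    · have hm : pvMaskB x.2 = 1 := by simp [pvMaskB, h1, h2, h3]
      have hs : pvStepA (PySem.Dict.mk [("deletion_only", c1), ("ts_allele_only", c2), ("allele_only", c3), ("deletion_and_ts_allele", c4), ("deletion_and_allele", c5), ("ts_allele_and_allele", c6), ("all_three", c7)]) x = PySem.Dict.mk [("deletion_only", c1 + 1), ("ts_allele_only", c2), ("allele_only", c3), ("deletion_and_ts_allele", c4), ("deletion_and_allele", c5), ("ts_allele_and_allele", c6), ("all_three", c7)] := by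
        simp [pvStepA, h1, h2, h3]
        simp [PySem.Dict.modify, PySem.Dict.getD, PySem.Dict.get?, PySem.Dict.insert]
      rw [hs, ih _ _ _ _ _ _ _]
      simp [List.count_cons, hm, List.cons.injEq, Prod.mk.injEq]
      omega
    · have hm : pvMaskB x.2 = 5 := by simp [pvMaskB, h1, h2, h3]
      have hs : pvStepA (PySem.Dict.mk [("deletion_only", c1), ("ts_allele_only", c2), ("allele_only", c3), ("deletion_and_ts_allele", c4), ("deletion_and_allele", c5), ("ts_allele_and_allele", c6), ("all_three", c7)]) x = PySem.Dict.mk [("deletion_only", c1), ("ts_allele_only", c2), ("allele_only", c3), ("deletion_and_ts_allele", c4), ("deletion_and_allele", c5 + 1), ("ts_allele_and_allele", c6), ("all_three", c7)] := by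
        simp [pvStepA, h1, h2, h3]
        simp [PySem.Dict.modify, PySem.Dict.getD, PySem.Dict.get?, PySem.Dict.insert]
      rw [hs, ih _ _ _ _ _ _ _]
      simp [List.count_cons, hm, List.cons.injEq, Prod.mk.injEq]
      omega
    · have hm : pvMaskB x.2 = 3 := by simp [pvMaskB, h1, h2, h3]
      have hs : pvStepA (PySem.Dict.mk [("deletion_only", c1), ("ts_allele_only", c2), ("allele_only", c3), ("deletion_and_ts_allele", c4), ("deletion_and_allele", c5), ("ts_allele_and_allele", c6), ("all_three", c7)]) x = PySem.Dict.mk [("deletion_only", c1), ("ts_allele_only", c2), ("allele_only", c3), ("deletion_and_ts_allele", c4 + 1), ("deletion_and_allele", c5), ("ts_allele_and_allele", c6), ("all_three", c7)] := by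
        simp [pvStepA, h1, h2, h3]
        simp [PySem.Dict.modify, PySem.Dict.getD, PySem.Dict.get?, PySem.Dict.insert]
      rw [hs, ih _ _ _ _ _ _ _]
      simp [List.count_cons, hm, List.cons.injEq, Prod.mk.injEq]
      omega
    · have hm : pvMaskB x.2 = 7 := by simp [pvMaskB, h1, h2, h3]
      have hs : pvStepA (PySem.Dict.mk [("deletion_only", c1), ("ts_allele_only", c2), ("allele_only", c3), ("deletion_and_ts_allele", c4), ("deletion_and_allele", c5), ("ts_allele_and_allele", c6), ("all_three", c7)]) x = PySem.Dict.mk [("deletion_only", c1), ("ts_allele_only", c2), ("allele_only", c3), ("deletion_and_ts_allele", c4), ("deletion_and_allele", c5), ("ts_allele_and_allele", c6), ("all_three", c7 + 1)] := by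
        simp [pvStepA, h1, h2, h3]
        simp [PySem.Dict.modify, PySem.Dict.getD, PySem.Dict.get?, PySem.Dict.insert]
      rw [hs, ih _ _ _ _ _ _ _]
      simp [List.count_cons, hm, List.cons.injEq, Prod.mk.injEq]
      omega

-- ===== VERDICT (by name: the statement is the Claim_ definition above) =====
theorem categorize_experiments_spec : Claim_equal_categorize_experiments := by
  intro l name _
  unfold Spec_categorize_experiments categorize_experiments categorize_experiments_alt pvInitCats
  rw [pvFoldA_items, pvMasks_eq_map]
  simp
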